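-- pv_equiv track=rewrite | github.com/misty-step/bitterblossom | scripts/conductor.py | trusted_surfaces_pending
-- ===== SOURCE A (Python) =====
-- from typing import Any, Callable
--
-- FAILED_CHECK_CONCLUSIONS = {"FAILURE", "ERROR", "TIMED_OUT", "CANCELLED", "ACTION_REQUIRED", "STALE", "STARTUP_FAILURE"}
--
-- FAILED_STATUS_CONTEXTS = {"FAILURE", "ERROR"}
--
-- def rollup_item_name(item: dict[str, Any]) -> str:
--     typename = str(item.get("__typename", ""))
--     if typename == "CheckRun":
--         return str(item.get("name", ""))
--     if typename == "StatusContext":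
--         return str(item.get("context", ""))
--     return ""
--
-- def rollup_item_workflow_name(item: dict[str, Any]) -> str:
--     if str(item.get("__typename", "")) != "CheckRun":
--         return ""
--     return str(item.get("workflowName", ""))
--
-- def rollup_item_state(item: dict[str, Any]) -> tuple[str, bool, bool]:
--     typename = str(item.get("__typename", ""))
--     if typename == "CheckRun":
--         status = str(item.get("status", "")).upper()
--         if status != "COMPLETED":
--             return status or "PENDING", False, False
--         conclusion = str(item.get("conclusion", "")).upper()
--         if conclusion in FAILED_CHECK_CONCLUSIONS:
--             return conclusion or "FAILURE", True, True
--         return conclusion or "SUCCESS", True, False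
--
--     if typename == "StatusContext":
--         state = str(item.get("state", "")).upper()
--         if state in FAILED_STATUS_CONTEXTS:
--             return state, True, True
--         if state == "SUCCESS":
--             return state, True, False
--         return state or "PENDING", False, False
--
--     return "", False, False
--
-- def trusted_surface_matches(item: dict[str, Any], trusted_surface: str) -> bool:
--     names = {rollup_item_name(item)}
--     workflow_name = rollup_item_workflow_name(item)
--     if workflow_name:
--         names.add(workflow_name)
--     names.discard("")
--     return trusted_surface in names
--
-- def trusted_surfaces_pending(payload: dict[str, Any], trusted_surfaces: list[str]) -> list[str]:
--     """Return trusted surfaces that still block merge.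
--
--     A configured trusted surface blocks merge until it is observed at least once.
--     After it is observed, it continues to block while pending or failed.
--     """
--     blocking: list[str] = []
--     rollup = payload.get("statusCheckRollup", [])
--     if not isinstance(rollup, list):
--         return list(trusted_surfaces)
--
--     for pattern in trusted_surfaces:
--         matched = False
--         for item in rollup:
--             if not isinstance(item, dict):
--                 continue
--             if not trusted_surface_matches(item, pattern):
--                 continue
--             matched = True
--             name = rollup_item_name(item)
--             _state, terminal, failed = rollup_item_state(item)
--             if not terminal or failed:
--                 blocking.append(name)
--         if not matched:
--             blocking.append(pattern)
--     return blocking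
-- ===== SOURCE B (Python) =====
-- FAILED_CHECK_CONCLUSIONS = {"FAILURE", "ERROR", "TIMED_OUT", "CANCELLED", "ACTION_REQUIRED", "STALE", "STARTUP_FAILURE"}
--
-- FAILED_STATUS_CONTEXTS = {"FAILURE", "ERROR"}
--
--
-- def _classify(item):
--     """Return (name, workflow_name, blocks) for a rollup item in one pass."""
--     typename = str(item.get("__typename", ""))
--     if typename == "CheckRun":
--         name = str(item.get("name", ""))
--         workflow = str(item.get("workflowName", ""))
--         status = str(item.get("status", "")).upper()
--         if status != "COMPLETED":
--             blocks = True
--         else: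
--             blocks = str(item.get("conclusion", "")).upper() in FAILED_CHECK_CONCLUSIONS
--         return name, workflow, blocks
--     if typename == "StatusContext":
--         name = str(item.get("context", ""))
--         return name, "", str(item.get("state", "")).upper() != "SUCCESS"
--     return "", "", True
--
--
-- def trusted_surfaces_pending(payload, trusted_surfaces):
--     """Return trusted surfaces that still block merge.
--
--     One pass over the rollup builds an index from surface name (and workflow
--     name) to the ordered matching items; each configured surface is then a
--     single dictionary lookup.
--     """
--     rollup = payload.get("statusCheckRollup", [])
--     if not isinstance(rollup, list):
--         return list(trusted_surfaces)
--
--     index = {}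
--     for item in rollup:
--         if not isinstance(item, dict):
--             continue
--         name, workflow, blocks = _classify(item)
--         if name:
--             index.setdefault(name, []).append((name, blocks))
--         if workflow and workflow != name:
--             index.setdefault(workflow, []).append((name, blocks))
--
--     blocking = []
--     for pattern in trusted_surfaces:
--         entries = index.get(pattern, [])
--         if not entries:
--             blocking.append(pattern)
--         else:
--             blocking.extend(name for name, blocks in entries if blocks)
--     return blocking
-- ===== Notes on version B (the rewrite author's own statement) =====
-- stated objective: alternative
-- what changed: Instead of rescanning the whole rollup for every trusted surface, B makes one pass over the rollup building a dict from surface name (and workflow name) to the ordered list of (name, blocks) entries, then answers each configured surface with a single lookup.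
import Mathlib
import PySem

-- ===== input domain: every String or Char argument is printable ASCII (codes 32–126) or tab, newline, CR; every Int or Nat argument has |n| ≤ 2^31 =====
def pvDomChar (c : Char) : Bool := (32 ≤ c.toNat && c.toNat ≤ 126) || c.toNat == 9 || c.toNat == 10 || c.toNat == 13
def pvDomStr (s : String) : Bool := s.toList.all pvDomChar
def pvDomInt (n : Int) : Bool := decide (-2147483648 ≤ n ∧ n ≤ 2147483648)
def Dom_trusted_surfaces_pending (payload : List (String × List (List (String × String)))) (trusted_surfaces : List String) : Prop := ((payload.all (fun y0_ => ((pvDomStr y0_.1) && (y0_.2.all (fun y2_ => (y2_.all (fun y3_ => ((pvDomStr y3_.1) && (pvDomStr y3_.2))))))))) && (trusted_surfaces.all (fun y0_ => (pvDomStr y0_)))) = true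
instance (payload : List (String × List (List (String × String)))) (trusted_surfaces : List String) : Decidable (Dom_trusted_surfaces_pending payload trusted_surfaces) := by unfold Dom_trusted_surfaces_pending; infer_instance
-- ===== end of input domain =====

-- B replaces A's per-pattern rescan of the rollup by one indexing pass over the rollup
-- plus one dictionary lookup per configured pattern; same return value.

-- ===== PORT A =====
def pvFailedCheckConclusions : List String :=
  ["FAILURE", "ERROR", "TIMED_OUT", "CANCELLED", "ACTION_REQUIRED", "STALE", "STARTUP_FAILURE"]

def pvFailedStatusContexts : List String := ["FAILURE", "ERROR"]

def rollupItemName (item : List (String × String)) : String :=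
  let typename := (PySem.Dict.mk item).getD "__typename" ""
  if typename = "CheckRun" then (PySem.Dict.mk item).getD "name" ""
  else if typename = "StatusContext" then (PySem.Dict.mk item).getD "context" ""
  else ""

def rollupItemWorkflowName (item : List (String × String)) : String :=
  if (PySem.Dict.mk item).getD "__typename" "" ≠ "CheckRun" then ""
  else (PySem.Dict.mk item).getD "workflowName" ""

def rollupItemState (item : List (String × String)) : String × Bool × Bool :=
  let typename := (PySem.Dict.mk item).getD "__typename" ""
  if typename = "CheckRun" then
    let status := PySem.Str.upper ((PySem.Dict.mk item).getD "status" "")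
    if status ≠ "COMPLETED" then ((if status = "" then "PENDING" else status), false, false)
    else
      let conclusion := PySem.Str.upper ((PySem.Dict.mk item).getD "conclusion" "")
      if conclusion ∈ pvFailedCheckConclusions then
        ((if conclusion = "" then "FAILURE" else conclusion), true, true)
      else ((if conclusion = "" then "SUCCESS" else conclusion), true, false)
  else if typename = "StatusContext" then
    let state := PySem.Str.upper ((PySem.Dict.mk item).getD "state" "")
    if state ∈ pvFailedStatusContexts then (state, true, true)
    else if state = "SUCCESS" then (state, true, false)
    else ((if state = "" then "PENDING" else state), false, false)
  else ("", false, false)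

def trustedSurfaceMatches (item : List (String × String)) (trusted_surface : String) : Bool :=
  let names : PySem.Set String := PySem.Set.ofList [rollupItemName item]
  let workflowName := rollupItemWorkflowName item
  let names := if workflowName ≠ "" then PySem.Set.add names workflowName else names
  let names := PySem.Set.discard names ""
  PySem.Set.contains names trusted_surface

def trusted_surfaces_pending (payload : List (String × List (List (String × String)))) (trusted_surfaces : List String) : List String :=
  -- the `isinstance` guards of the Python never fire under the typed domain
  let rollup := (PySem.Dict.mk payload).getD "statusCheckRollup" []
  trusted_surfaces.foldl (fun blocking pattern =>
    let st := rollup.foldl (fun (st : Bool × List String) item =>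
      if ¬ trustedSurfaceMatches item pattern then st
      else
        let name := rollupItemName item
        let s := rollupItemState item
        if ¬ s.2.1 ∨ s.2.2 then (true, st.2 ++ [name]) else (true, st.2)) (false, blocking)
    if ¬ st.1 then st.2 ++ [pattern] else st.2) []

-- ===== PORT B =====
def pvClassify (item : List (String × String)) : String × String × Bool :=
  let typename := (PySem.Dict.mk item).getD "__typename" ""
  if typename = "CheckRun" then
    let name := (PySem.Dict.mk item).getD "name" ""
    let workflow := (PySem.Dict.mk item).getD "workflowName" ""
    let status := PySem.Str.upper ((PySem.Dict.mk item).getD "status" "")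
    let blocks :=
      if status ≠ "COMPLETED" then true
      else PySem.Str.upper ((PySem.Dict.mk item).getD "conclusion" "") ∈ pvFailedCheckConclusions
    (name, workflow, blocks)
  else if typename = "StatusContext" then
    ((PySem.Dict.mk item).getD "context" "", "",
      PySem.Str.upper ((PySem.Dict.mk item).getD "state" "") ≠ "SUCCESS")
  else ("", "", true)

def pvIndexItem (idx : PySem.Dict String (List (String × Bool))) (item : List (String × String)) : PySem.Dict String (List (String × Bool)) :=
  let c := pvClassify item
  let name := c.1
  let workflow := c.2.1
  let blocks := c.2.2
  let idx := if name ≠ "" then idx.insert name (idx.getD name [] ++ [(name, blocks)]) else idx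
  if workflow ≠ "" ∧ workflow ≠ name then
    idx.insert workflow (idx.getD workflow [] ++ [(name, blocks)])
  else idx

def trusted_surfaces_pending_alt (payload : List (String × List (List (String × String)))) (trusted_surfaces : List String) : List String :=
  let rollup := (PySem.Dict.mk payload).getD "statusCheckRollup" []
  let index := rollup.foldl pvIndexItem PySem.Dict.empty
  trusted_surfaces.foldl (fun blocking pattern =>
    let entries := index.getD pattern []
    if entries = [] then blocking ++ [pattern]
    else blocking ++ (entries.filter (·.2)).map (·.1)) []

-- ===== PRECONDITION & SPEC =====
def Spec_trusted_surfaces_pending (payload : List (String × List (List (String × String)))) (trusted_surfaces : List String) (out : List String) : Prop := out = trusted_surfaces_pending_alt payload trusted_surfaces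
instance (payload : List (String × List (List (String × String)))) (trusted_surfaces : List String) (out : List String) : Decidable (Spec_trusted_surfaces_pending payload trusted_surfaces out) := by unfold Spec_trusted_surfaces_pending; infer_instance

-- ===== CLAIM (what is proved, stated in full; the proofs are below) =====
def Claim_equal_trusted_surfaces_pending : Prop := ∀ (payload : List (String × List (List (String × String)))) (trusted_surfaces : List String), Dom_trusted_surfaces_pending payload trusted_surfaces → Spec_trusted_surfaces_pending payload trusted_surfaces (trusted_surfaces_pending payload trusted_surfaces)

-- ===== LEMMAS AND PROOFS =====

/-- The per-pattern entry list B's index stores at key `p`. -/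
def pvEntries (p : String) (rollup : List (List (String × String))) : List (String × Bool) :=
  rollup.flatMap (fun item =>
    if trustedSurfaceMatches item p then [((pvClassify item).1, (pvClassify item).2.2)] else [])

lemma pvClassify_fst (item : List (String × String)) :
    (pvClassify item).1 = rollupItemName item := by
  unfold pvClassify rollupItemName
  by_cases h1 : (PySem.Dict.mk item).getD "__typename" "" = "CheckRun" <;>
    by_cases h2 : (PySem.Dict.mk item).getD "__typename" "" = "StatusContext" <;>
      simp [h1, h2]

lemma pvClassify_workflow (item : List (String × String)) :
    (pvClassify item).2.1 = rollupItemWorkflowName item := by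
  unfold pvClassify rollupItemWorkflowName
  by_cases h1 : (PySem.Dict.mk item).getD "__typename" "" = "CheckRun" <;>
    by_cases h2 : (PySem.Dict.mk item).getD "__typename" "" = "StatusContext" <;>
      simp [h1, h2]

lemma pvClassify_blocks (item : List (String × String)) :
    (pvClassify item).2.2 = (!(rollupItemState item).2.1 || (rollupItemState item).2.2) := by
  unfold pvClassify rollupItemState pvFailedStatusContexts
  by_cases h1 : (PySem.Dict.mk item).getD "__typename" "" = "CheckRun"
  · by_cases h3 : PySem.Str.upper ((PySem.Dict.mk item).getD "status" "") = "COMPLETED" <;>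
      simp [h1, h3] <;>
        by_cases h4 : PySem.Str.upper ((PySem.Dict.mk item).getD "conclusion" "") ∈ pvFailedCheckConclusions <;>
          simp [h4]
  · by_cases h2 : (PySem.Dict.mk item).getD "__typename" "" = "StatusContext"
    · by_cases h5 : PySem.Str.upper ((PySem.Dict.mk item).getD "state" "") ∈ (["FAILURE", "ERROR"] : List String)
      · have : PySem.Str.upper ((PySem.Dict.mk item).getD "state" "") ≠ "SUCCESS" := by
          simp only [List.mem_cons, List.not_mem_nil, or_false] at h5
          rcases h5 with h | h <;> simp [h]
        simp [h1, h2, h5, this]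
      · by_cases h6 : PySem.Str.upper ((PySem.Dict.mk item).getD "state" "") = "SUCCESS" <;>
          simp [h1, h2, h5, h6]
    · simp [h1, h2]

lemma matches_iff (item : List (String × String)) (p : String) :
    trustedSurfaceMatches item p = true ↔
      ((p = (pvClassify item).1 ∧ p ≠ "") ∨
       (p = (pvClassify item).2.1 ∧ (pvClassify item).2.1 ≠ "")) := by
  rw [pvClassify_fst, pvClassify_workflow]
  unfold trustedSurfaceMatches
  simp only [PySem.Set.ofList, PySem.Set.add, PySem.Set.discard, PySem.Set.contains,
    PySem.Set.empty]
  by_cases hw : rollupItemWorkflowName item = "" <;>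
    by_cases hn : rollupItemName item = "" <;>
      simp_all <;> aesop

lemma getD_pvIndexItem (idx : PySem.Dict String (List (String × Bool)))
    (item : List (String × String)) (p : String) :
    (pvIndexItem idx item).getD p [] =
      idx.getD p [] ++ (if trustedSurfaceMatches item p then
        [((pvClassify item).1, (pvClassify item).2.2)] else []) := by
  unfold pvIndexItem
  by_cases hm : trustedSurfaceMatches item p = true
  · rcases (matches_iff item p).1 hm with ⟨hp, hne⟩ | ⟨hp, hne⟩
    · -- p is the item's name (nonempty): the first insert appends the entry
      subst hp
      by_cases h2 : (pvClassify item).2.1 ≠ "" ∧ (pvClassify item).2.1 ≠ (pvClassify item).1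
      · simp [hne, h2, PySem.Dict.getD_insert, h2.2, hm, Ne.symm h2.2]
      · simp [hne, h2, PySem.Dict.getD_insert, hm]
    · -- p is the item's workflow name (nonempty)
      subst hp
      by_cases hpn : (pvClassify item).2.1 = (pvClassify item).1
      · -- workflow equals name: covered by the first insert
        by_cases hn : (pvClassify item).1 ≠ ""
        · rw [hpn] at hm
          simp [hn, hpn, PySem.Dict.getD_insert, hm]
        · exact absurd (hpn.trans (not_not.1 hn)) hne
      · simp only [if_pos (And.intro hne hpn)]
        by_cases hn : (pvClassify item).1 ≠ ""
        · simp [hn, PySem.Dict.getD_insert, hpn, hm]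
        · simp [hn, PySem.Dict.getD_insert, hm]
  · -- no match: p is neither the (nonempty) name nor the (nonempty) workflow
    have h := (matches_iff item p).not.1 (by simpa using hm)
    push_neg at h
    obtain ⟨h1, h2r⟩ := h
    by_cases hn : (pvClassify item).1 ≠ ""
    · have hp1 : p ≠ (pvClassify item).1 := fun hp => hn (by rw [← hp]; exact h1 hp)
      by_cases hw2 : (pvClassify item).2.1 ≠ "" ∧ (pvClassify item).2.1 ≠ (pvClassify item).1
      · have hp2 : p ≠ (pvClassify item).2.1 := fun hp => hw2.1 (h2r hp)
        simp [hm, hn, hw2, PySem.Dict.getD_insert, hp1, hp2]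
      · simp [hm, hn, hw2, PySem.Dict.getD_insert, hp1]
    · by_cases hw2 : (pvClassify item).2.1 ≠ "" ∧ (pvClassify item).2.1 ≠ (pvClassify item).1
      · have hp2 : p ≠ (pvClassify item).2.1 := fun hp => hw2.1 (h2r hp)
        simp [hm, hn, hw2, PySem.Dict.getD_insert, hp2]
      · simp [hm, hn, hw2]

lemma getD_foldl_pvIndexItem (rollup : List (List (String × String)))
    (idx : PySem.Dict String (List (String × Bool))) (p : String) :
    (rollup.foldl pvIndexItem idx).getD p [] = idx.getD p [] ++ pvEntries p rollup := by
  induction rollup generalizing idx with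
  | nil => simp [pvEntries]
  | cons item rest ih =>
    simp only [List.foldl_cons, ih, getD_pvIndexItem, pvEntries, List.flatMap_cons,
      List.append_assoc]

lemma pvEntries_eq_nil_iff (p : String) (rollup : List (List (String × String))) :
    pvEntries p rollup = [] ↔ rollup.all (fun item => ¬ trustedSurfaceMatches item p) := by
  induction rollup with
  | nil => simp [pvEntries]
  | cons item rest ih =>
    simp only [pvEntries, List.flatMap_cons, List.all_cons] at *
    by_cases hm : trustedSurfaceMatches item p = true <;> simp_all

lemma inner_loop_eq (pattern : String) (rollup : List (List (String × String)))
    (m : Bool) (acc : List String) :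
    (rollup.foldl (fun (st : Bool × List String) item =>
      if ¬ trustedSurfaceMatches item pattern then st
      else
        let name := rollupItemName item
        let s := rollupItemState item
        if ¬ s.2.1 ∨ s.2.2 then (true, st.2 ++ [name]) else (true, st.2)) (m, acc)) =
    ((m || rollup.any (fun item => trustedSurfaceMatches item pattern)),
      acc ++ ((pvEntries pattern rollup).filter (·.2)).map (·.1)) := by
  induction rollup generalizing m acc with
  | nil => simp [pvEntries]
  | cons item rest ih =>
    simp only [List.foldl_cons, List.any_cons, pvEntries, List.flatMap_cons]
    by_cases hm : trustedSurfaceMatches item pattern = true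
    · have hb := pvClassify_blocks item
      have hnm := pvClassify_fst item
      by_cases hblk : ¬ (rollupItemState item).2.1 ∨ (rollupItemState item).2.2 = true
      · have : (pvClassify item).2.2 = true := by
          rw [hb]; rcases hblk with h | h <;> simp [h]
        simp only [hm, not_true, if_false, if_pos hblk, ih]
        simp [pvEntries, hm, this, hnm]
      · have : (pvClassify item).2.2 = false := by
          rw [hb]; push_neg at hblk; simp [hblk.1, hblk.2]
        simp only [hm, not_true, if_false, if_neg hblk, ih]
        simp [pvEntries, hm, this]
    · simp only [Bool.not_eq_true] at hm
      rw [if_pos (by simp [hm] : ¬trustedSurfaceMatches item pattern = true), ih]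
      simp [pvEntries, hm]

-- ===== VERDICT (by name: the statement is the Claim_ definition above) =====
theorem trusted_surfaces_pending_spec : Claim_equal_trusted_surfaces_pending := by
  intro payload trusted_surfaces hdom
  clear hdom
  unfold Spec_trusted_surfaces_pending trusted_surfaces_pending trusted_surfaces_pending_alt
  generalize (PySem.Dict.mk payload).getD "statusCheckRollup" [] = rollup
  suffices h : ∀ acc : List String,
      trusted_surfaces.foldl (fun blocking pattern =>
        let st := rollup.foldl (fun (st : Bool × List String) item =>
          if ¬ trustedSurfaceMatches item pattern then st
          else
            let name := rollupItemName item
            let s := rollupItemState item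
            if ¬ s.2.1 ∨ s.2.2 then (true, st.2 ++ [name]) else (true, st.2)) (false, blocking)
        if ¬ st.1 then st.2 ++ [pattern] else st.2) acc =
      trusted_surfaces.foldl (fun blocking pattern =>
        let entries := (rollup.foldl pvIndexItem PySem.Dict.empty).getD pattern []
        if entries = [] then blocking ++ [pattern]
        else blocking ++ (entries.filter (·.2)).map (·.1)) acc by
    exact h []
  intro acc
  induction trusted_surfaces generalizing acc with
  | nil => rfl
  | cons pattern rest ih =>
    simp only [List.foldl_cons]
    rw [inner_loop_eq]
    have hidx : (rollup.foldl pvIndexItem PySem.Dict.empty).getD pattern [] =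
        pvEntries pattern rollup := by
      rw [getD_foldl_pvIndexItem]; simp
    by_cases hmatch : rollup.any (fun item => trustedSurfaceMatches item pattern) = true
    · have hne : pvEntries pattern rollup ≠ [] := by
        rw [Ne, pvEntries_eq_nil_iff]
        simp only [List.any_eq_true] at hmatch
        obtain ⟨it, hit, hmit⟩ := hmatch
        simp only [List.all_eq_true]
        push_neg
        exact ⟨it, hit, by simp [hmit]⟩
      rw [ih]
      simp [hidx, hne, hmatch]
    · have hnil : pvEntries pattern rollup = [] := by
        rw [pvEntries_eq_nil_iff]
        simp only [List.any_eq_true] at hmatch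
        push_neg at hmatch
        simp only [List.all_eq_true]
        intro it hit
        simp [hmatch it hit]
      rw [ih]
      simp only [Bool.false_or] at *
      simp [hidx, hnil, hmatch]
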